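-- pv_equiv track=rewrite | github.com/rf-data/Agentic_pdf_parsing | src/tools/cleaning.py | detect_repeated_lines
-- ===== SOURCE A (Python) =====
-- from collections import Counter
--
-- def detect_repeated_lines(pages: dict[str, str],
--                           min_count: int=3):
--     line_counts = Counter()
--
--     for page in pages:
--         # text = page.extract_text()
--         text = page["text_raw"] # .extract_text(x_tolerance=2, y_tolerance=2)  # (layout=True)       # x_tolerance=2, y_tolerance=2
--
--         if not text:
--             continue
--
--         lines = text.split("\n")
--
--         for line in lines:
--             if line:       # len(line) > 7
--                 line_counts[line.strip()] += 1
--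
--     return {
--         line for line, count in line_counts.items()
--         if count > min_count   # threshold anpassen
--     }
-- ===== SOURCE B (Python) =====
-- def detect_repeated_lines(pages: dict[str, str],
--                           min_count: int = 3):
--     # Flatten all qualifying stripped lines into one list.
--     stripped = []
--     for page in pages:
--         text = page["text_raw"]
--         if text:
--             for line in text.split("\n"):
--                 if line:
--                     stripped.append(line.strip())
--     # Sort, then one linear scan over runs of equal values: a run longer
--     # than min_count marks its value as frequent.
--     frequent = set()
--     ordered = sorted(stripped)
--     i = 0
--     while i < len(ordered):
--         j = i + 1
--         while j < len(ordered) and ordered[j] == ordered[i]: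
--             j += 1
--         if j - i > min_count:
--             frequent.add(ordered[i])
--         i = j
--     return {s for s in stripped if s in frequent}
-- ===== Notes on version B (the rewrite author's own statement) =====
-- stated objective: alternative
-- what changed: B replaces A's Counter hash-accumulation with sort-then-scan: it flattens the qualifying stripped lines, sorts them, counts each run of equal consecutive values in one linear pass to find the frequent lines, and builds the result set from those.
import Mathlib
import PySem

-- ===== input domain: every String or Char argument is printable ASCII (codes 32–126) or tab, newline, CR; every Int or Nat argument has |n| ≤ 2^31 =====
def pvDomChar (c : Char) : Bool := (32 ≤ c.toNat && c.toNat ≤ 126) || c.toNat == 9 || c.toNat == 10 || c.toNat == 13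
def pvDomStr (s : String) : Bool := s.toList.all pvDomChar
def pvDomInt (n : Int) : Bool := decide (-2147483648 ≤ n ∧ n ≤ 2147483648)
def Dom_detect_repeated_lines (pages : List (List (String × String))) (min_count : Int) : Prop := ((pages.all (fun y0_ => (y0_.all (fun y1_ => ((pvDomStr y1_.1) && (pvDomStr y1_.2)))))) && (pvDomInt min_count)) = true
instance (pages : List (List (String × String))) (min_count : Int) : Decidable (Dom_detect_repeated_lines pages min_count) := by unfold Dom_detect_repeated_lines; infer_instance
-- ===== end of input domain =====

-- B replaces A's Counter accumulation with sort-then-scan over runs of equal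
-- consecutive stripped lines (objective: alternative algorithm, not faster).


-- ===== PORT A =====
-- line_counts = Counter(); for page: text = page["text_raw"] (Pre_ guarantees the key, so getD "" never fires);
-- skip falsy text; for line in text.split("\n"): if line: line_counts[line.strip()] += 1; return the filtered set.
def detect_repeated_lines (pages : List (List (String × String))) (min_count : Int) : List String :=
  let line_counts : PySem.Dict String Int :=
    pages.foldl (fun d page =>
      let text := (PySem.Dict.mk page).getD "text_raw" ""
      if text = "" then d
      else ((PySem.Str.split? text "\n").getD []).foldl (fun d line =>
        if line == "" then d
        else d.modify (PySem.Str.strip line) 0 (· + 1)) d) PySem.Dict.empty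
  PySem.Set.ofList ((line_counts.items.filter (fun p => p.2 > min_count)).map (·.1))

-- ===== PORT B =====
-- The run scan: the Python while loop over the sorted list; the inner 'while j' advance
-- is the takeWhile/dropWhile split of the current run, 'j - i' is run.length + 1.
def pvRunScan (mc : Int) (frequent : PySem.Set String) : List String → PySem.Set String
  | [] => frequent
  | x :: xs =>
      let run := xs.takeWhile (· == x)
      let rest := xs.dropWhile (· == x)
      pvRunScan mc (if ((run.length : Int) + 1 > mc) then frequent.add x else frequent) rest
  termination_by l => l.length
  decreasing_by
    have := List.length_dropWhile_le (· == x) xs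
    simp only [List.length_cons]
    omega

-- stripped = flat list of line.strip() for every truthy line of every truthy page text;
-- frequent = run scan over sorted(stripped); return {s for s in stripped if s in frequent}.
def detect_repeated_lines_alt (pages : List (List (String × String))) (min_count : Int) : List String :=
  let stripped : List String :=
    pages.foldl (fun acc page =>
      let text := (PySem.Dict.mk page).getD "text_raw" ""
      if text = "" then acc
      else ((PySem.Str.split? text "\n").getD []).foldl (fun acc line =>
        if line == "" then acc
        else acc ++ [PySem.Str.strip line]) acc) []
  let frequent := pvRunScan min_count PySem.Set.empty (PySem.List.sorted stripped (fun s => s) false)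
  PySem.Set.ofList (stripped.filter (fun s => frequent.contains s))

-- ===== PRECONDITION & SPEC =====
-- Pre_ excludes pages without a "text_raw" key, on which Python A (and B) raise KeyError.
def Pre_detect_repeated_lines (pages : List (List (String × String))) (min_count : Int) : Prop :=
  ∀ page ∈ pages, (PySem.Dict.mk page).contains "text_raw" = true
instance (pages : List (List (String × String))) (min_count : Int) : Decidable (Pre_detect_repeated_lines pages min_count) := by unfold Pre_detect_repeated_lines; infer_instance
def pvWitness_detect_repeated_lines : (List (List (String × String))) × Int :=
  ([[("text_raw", "a\nb\na")], [("text_raw", " a ")]], 1)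
def Spec_detect_repeated_lines (pages : List (List (String × String))) (min_count : Int) (out : List String) : Prop := out = detect_repeated_lines_alt pages min_count
instance (pages : List (List (String × String))) (min_count : Int) (out : List String) : Decidable (Spec_detect_repeated_lines pages min_count out) := by unfold Spec_detect_repeated_lines; infer_instance

-- ===== CLAIM (what is proved, stated in full; the proofs are below) =====
def Claim_equal_detect_repeated_lines : Prop := ∀ (pages : List (List (String × String))) (min_count : Int), Dom_detect_repeated_lines pages min_count → Pre_detect_repeated_lines pages min_count → Spec_detect_repeated_lines pages min_count (detect_repeated_lines pages min_count)

-- ===== LEMMAS AND PROOFS =====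

-- the qualifying stripped lines contributed by one page
def pvLinesOf (page : List (String × String)) : List String :=
  let text := (PySem.Dict.mk page).getD "text_raw" ""
  if text = "" then []
  else (((PySem.Str.split? text "\n").getD []).filter (fun l => !(l == ""))).map PySem.Str.strip

theorem pvInnerA (ls : List String) (d : PySem.Dict String Int) :
    ls.foldl (fun d line => if line == "" then d else d.modify (PySem.Str.strip line) 0 (· + 1)) d
    = ((ls.filter (fun l => !(l == ""))).map PySem.Str.strip).foldl
        (fun d s => d.modify s 0 (· + 1)) d := by
  induction ls generalizing d with
  | nil => rfl
  | cons l t ih =>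
    rw [List.foldl_cons, List.filter_cons]
    by_cases h : l = ""
    · rw [if_pos (show (l == "") = true by simp [h]),
          if_neg (show ¬((!(l == "")) = true) by simp [h])]
      exact ih d
    · rw [if_neg (show ¬((l == "") = true) by simp [h]),
          if_pos (show (!(l == "")) = true by simp [h]),
          List.map_cons, List.foldl_cons]
      exact ih _

theorem pvFoldA (pages : List (List (String × String))) (d : PySem.Dict String Int) :
    pages.foldl (fun d page =>
      let text := (PySem.Dict.mk page).getD "text_raw" ""
      if text = "" then d
      else ((PySem.Str.split? text "\n").getD []).foldl (fun d line =>
        if line == "" then d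
        else d.modify (PySem.Str.strip line) 0 (· + 1)) d) d
    = (pages.flatMap pvLinesOf).foldl (fun d s => d.modify s 0 (· + 1)) d := by
  induction pages generalizing d with
  | nil => rfl
  | cons page t ih =>
    rw [List.foldl_cons, ih, List.flatMap_cons, List.foldl_append]
    congr 1
    by_cases h : (PySem.Dict.mk page).getD "text_raw" "" = ""
    · simp [pvLinesOf, h]
    · simp only [pvLinesOf, if_neg h]
      exact pvInnerA _ _

theorem pvInnerB (ls : List String) (acc : List String) :
    ls.foldl (fun acc line => if line == "" then acc else acc ++ [PySem.Str.strip line]) acc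
    = acc ++ ((ls.filter (fun l => !(l == ""))).map PySem.Str.strip) := by
  induction ls generalizing acc with
  | nil => simp
  | cons l t ih =>
    rw [List.foldl_cons, List.filter_cons]
    by_cases h : l = ""
    · rw [if_pos (show (l == "") = true by simp [h]),
          if_neg (show ¬((!(l == "")) = true) by simp [h])]
      exact ih acc
    · rw [if_neg (show ¬((l == "") = true) by simp [h]),
          if_pos (show (!(l == "")) = true by simp [h]),
          List.map_cons, ih, List.append_assoc]
      rfl

theorem pvFoldB (pages : List (List (String × String))) (acc : List String) :
    pages.foldl (fun acc page =>
      let text := (PySem.Dict.mk page).getD "text_raw" ""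
      if text = "" then acc
      else ((PySem.Str.split? text "\n").getD []).foldl (fun acc line =>
        if line == "" then acc
        else acc ++ [PySem.Str.strip line]) acc) acc
    = acc ++ pages.flatMap pvLinesOf := by
  induction pages generalizing acc with
  | nil => simp
  | cons page t ih =>
    rw [List.foldl_cons, ih, List.flatMap_cons]
    by_cases h : (PySem.Dict.mk page).getD "text_raw" "" = ""
    · simp [pvLinesOf, h]
    · simp only [pvLinesOf, if_neg h, pvInnerB, List.append_assoc]

theorem pvOfListFilter (l : List String) (q : String → Bool) :
    (PySem.Set.ofList l).filter q = PySem.Set.ofList (l.filter q) := by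
  induction l using List.reverseRecOn with
  | nil => rfl
  | append_singleton xs x ih =>
    rw [PySem.Set.ofList_append_singleton, List.filter_append]
    by_cases hm : x ∈ xs <;> by_cases hq : q x = true <;>
      simp [PySem.Set.add, PySem.Set.ofList_append_singleton,
        PySem.Set.mem_ofList, List.mem_filter, hm, hq, ih, List.filter_append]

-- after dropping the leading run of x from a ≤-sorted list whose elements are all ≥ x,
-- x no longer occurs
theorem pvNotMemDrop (x : String) (xs : List String)
    (hp : xs.Pairwise (· ≤ ·)) (hx : ∀ y ∈ xs, x ≤ y) :
    x ∉ xs.dropWhile (· == x) := by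
  induction xs with
  | nil => simp
  | cons a t ih =>
    rw [List.dropWhile_cons]
    by_cases h : a = x
    · rw [if_pos (by simp [h])]
      exact ih hp.tail (fun y hy => hx y (List.mem_cons_of_mem _ hy))
    · rw [if_neg (by simp [h])]
      intro hmem
      have hxa : x < a := lt_of_le_of_ne (hx a (List.mem_cons_self ..)) (fun e => h e.symm)
      rcases List.mem_cons.mp hmem with rfl | hmem
      · exact absurd rfl (ne_of_gt hxa)
      · have : a ≤ x := (List.pairwise_cons.mp hp).1 x hmem
        exact absurd hxa (not_lt_of_ge this)

-- characterisation of the run scan on a ≤-sorted list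
theorem pvRunScanMem (mc : Int) (s : String) (q : PySem.Set String) (l : List String) :
    l.Pairwise (· ≤ ·) → (s ∈ pvRunScan mc q l ↔ s ∈ q ∨ (s ∈ l ∧ mc < (l.count s : Int))) := by
  induction q, l using pvRunScan.induct mc with
  | case1 q => intro _; simp [pvRunScan]
  | case2 q x xs run rest ih =>
      intro hp
      rw [pvRunScan]
      have hsplit : xs = xs.takeWhile (· == x) ++ xs.dropWhile (· == x) :=
        (List.takeWhile_append_dropWhile).symm
      have hrun : ∀ y ∈ xs.takeWhile (· == x), y = x := by
        intro y hy; exact eq_of_beq (List.mem_takeWhile_imp (p := (· == x)) hy)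
      have hxle : ∀ y ∈ xs, x ≤ y := fun y hy => (List.pairwise_cons.mp hp).1 y hy
      have hdropsub : List.Sublist (xs.dropWhile (· == x)) xs := List.dropWhile_sublist _
      have hprest : (xs.dropWhile (· == x)).Pairwise (· ≤ ·) :=
        hp.tail.sublist hdropsub
      have hxnot : x ∉ xs.dropWhile (· == x) := pvNotMemDrop x xs hp.tail hxle
      simp only [run, rest, dite_eq_ite] at ih
      rw [ih hprest]
      by_cases hs : s = x
      · subst hs
        have hcnt : (s :: xs).count s = (xs.takeWhile (· == s)).length + 1 := by
          conv_lhs => rw [show s :: xs = s :: (xs.takeWhile (· == s) ++ xs.dropWhile (· == s)) from by rw [← hsplit]]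
          rw [List.count_cons, List.count_append]
          have h1 : (xs.takeWhile (· == s)).count s = (xs.takeWhile (· == s)).length :=
            List.count_eq_length.mpr (fun y hy => by simp [hrun y hy])
          have h2 : (xs.dropWhile (· == s)).count s = 0 :=
            List.count_eq_zero.mpr hxnot
          simp [h1, h2]
        constructor
        · rintro (hq | ⟨hmem, _⟩)
          · split_ifs at hq with hc
            · rcases (PySem.Set.mem_add _ _ _).mp hq with hq | -
              · exact Or.inl hq
              · exact Or.inr ⟨List.mem_cons_self .., by rw [hcnt]; push_cast; omega⟩
            · exact Or.inl hq
          · exact absurd hmem hxnot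
        · rintro (hq | ⟨_, hlt⟩)
          · left; split_ifs with hc
            · exact (PySem.Set.mem_add _ _ _).mpr (Or.inl hq)
            · exact hq
          · rw [hcnt] at hlt; push_cast at hlt
            left; rw [if_pos (by omega)]
            exact (PySem.Set.mem_add _ _ _).mpr (Or.inr rfl)
      · -- s ≠ x: membership and count reduce to the rest of the list
        have hqmem : (s ∈ (if (((xs.takeWhile (· == x)).length : Int) + 1 > mc) then q.add x else q)) ↔ s ∈ q := by
          split_ifs
          · rw [PySem.Set.mem_add]; simp [hs]
          · exact Iff.rfl
        rw [hqmem]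
        have hmem : (s ∈ x :: xs) ↔ s ∈ xs.dropWhile (· == x) := by
          constructor
          · intro h
            rcases List.mem_cons.mp h with rfl | h
            · exact absurd rfl hs
            · rw [hsplit] at h
              rcases List.mem_append.mp h with h | h
              · exact absurd (hrun s h) hs
              · exact h
          · intro h
            exact List.mem_cons_of_mem _ (hsplit ▸ List.mem_append.mpr (Or.inr h))
        have hcnt : (x :: xs).count s = (xs.dropWhile (· == x)).count s := by
          conv_lhs => rw [show x :: xs = x :: (xs.takeWhile (· == x) ++ xs.dropWhile (· == x)) from by rw [← hsplit]]
          rw [List.count_cons, List.count_append]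
          have h1 : (xs.takeWhile (· == x)).count s = 0 :=
            List.count_eq_zero.mpr (fun h => hs (hrun s h))
          simp [h1, Ne.symm hs]
        rw [hmem, hcnt]

-- on elements of stripped, membership in the scanned set is exactly 'count > min_count'
theorem pvFreqIff (mc : Int) (L : List String) (s : String) (hs : s ∈ L) :
    (pvRunScan mc PySem.Set.empty (PySem.List.sorted L (fun z => z) false)).contains s
      = decide (mc < (L.count s : Int)) := by
  have hp : (PySem.List.sorted L (fun z => z) false).Pairwise (· ≤ ·) :=
    PySem.List.sorted_pairwise L (fun z => z)
  have hperm := PySem.List.sorted_perm L (fun z => z) false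
  have hmem := pvRunScanMem mc s PySem.Set.empty (PySem.List.sorted L (fun z => z) false) hp
  rw [hperm.count_eq, hperm.mem_iff] at hmem
  simp only [PySem.Set.empty, List.not_mem_nil, false_or] at hmem
  by_cases h : mc < (L.count s : Int)
  · simp [h, hmem, hs]
  · simp [h, hmem]

-- ===== VERDICT (by name: the statement is the Claim_ definition above) =====
theorem detect_repeated_lines_spec : Claim_equal_detect_repeated_lines := by
  intro pages min_count _ _
  unfold Spec_detect_repeated_lines detect_repeated_lines detect_repeated_lines_alt
  simp only [pvFoldA, pvFoldB, List.nil_append]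
  rw [← PySem.Dict.counter_eq_foldl, PySem.Dict.items_counter]
  rw [List.filter_map, List.map_map]
  rw [show ((fun x => (x : String × Int).1) ∘
        fun k => (k, (↑(List.count k (pages.flatMap pvLinesOf)) : Int))) = id from rfl,
      List.map_id, pvOfListFilter, PySem.Set.ofList_ofList]
  congr 1
  exact List.filter_congr (fun s hs => (pvFreqIff min_count _ s hs).symm)
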